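-- pv_equiv track=rewrite | github.com/IES-Rafael-Alberti/2425-u2-2-2-sentencias-iterativas-Jesusgallardooo | src/ej06.py | generar_triangulo
-- ===== SOURCE A (Python) =====
-- def generar_triangulo(numero):
--
--     contador = 1
--     triangulo = ""
--     mensaje = ""
--
--     while contador <= int(numero):
--         triangulo = triangulo + ("* ")
--         mensaje = mensaje + triangulo + "\n"
--         contador += 1
--
--     return mensaje
-- ===== SOURCE B (Python) =====
-- def generar_triangulo(numero):
--     n = int(numero)
--     fila = "* " * n          # longest row, computed once
--     partes = []
--     i = n
--     while i >= 1:            # build rows back-to-front as prefixes of fila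
--         partes.append(fila[:2 * i] + "\n")
--         i -= 1
--     partes.reverse()
--     return "".join(partes)
-- ===== Notes on version B (the rewrite author's own statement) =====
-- stated objective: faster
-- what changed: B precomputes the widest row once with a single string multiplication and obtains every row as a prefix slice fila[:2*i] of that template, collecting the rows back-to-front (i = n down to 1) into a list that is reversed and joined once, instead of A's forward while loop growing two cumulative string accumulators by + each iteration.
import Mathlib
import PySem

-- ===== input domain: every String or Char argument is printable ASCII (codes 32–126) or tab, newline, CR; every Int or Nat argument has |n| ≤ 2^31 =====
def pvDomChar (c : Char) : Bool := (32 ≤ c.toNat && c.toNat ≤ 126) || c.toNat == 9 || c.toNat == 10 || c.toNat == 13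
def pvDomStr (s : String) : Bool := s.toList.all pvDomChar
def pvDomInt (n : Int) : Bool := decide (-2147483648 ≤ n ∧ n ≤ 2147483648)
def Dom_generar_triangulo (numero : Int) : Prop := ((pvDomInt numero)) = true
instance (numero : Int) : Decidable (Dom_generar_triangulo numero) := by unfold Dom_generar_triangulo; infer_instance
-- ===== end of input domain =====

-- B precomputes the widest row once and slices each row as a prefix of it, collecting
-- rows back-to-front into a list joined once, instead of A's forward loop growing two
-- cumulative string accumulators by repeated concatenation (objective: faster).

-- ===== PORT A =====
-- The while loop runs exactly numero.toNat iterations (contador = 1 .. int(numero)),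
-- carrying the two string accumulators; strings are ported as List Char (exact: ASCII literals).
def pvAGo : Nat → List Char → List Char → List Char
  | 0, _, mensaje => mensaje
  | fuel + 1, triangulo, mensaje =>
      let t := triangulo ++ "* ".toList
      pvAGo fuel t (mensaje ++ t ++ "\n".toList)

def generar_triangulo (numero : Int) : String :=
  String.ofList (pvAGo numero.toNat [] [])

-- ===== PORT B =====
-- "* " * n → PySem.List.pyRepeat; fila[:2*i] → PySem.List.slice; the descending while
-- loop (i = n, n-1, …, 1) becomes fuel recursion with fuel = i; then reverse and join (flatten).
def pvBLoop (fila : List Char) : Nat → List (List Char) → List (List Char)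
  | 0, partes => partes
  | k + 1, partes =>
      pvBLoop fila k
        (partes ++ [PySem.List.slice fila none (some (2 * ((k : Int) + 1))) ++ "\n".toList])

def generar_triangulo_alt (numero : Int) : String :=
  let fila := PySem.List.pyRepeat "* ".toList numero
  String.ofList (List.flatten ((pvBLoop fila numero.toNat []).reverse))

-- ===== PRECONDITION & SPEC =====
def Spec_generar_triangulo (numero : Int) (out : String) : Prop := out = generar_triangulo_alt numero
instance (numero : Int) (out : String) : Decidable (Spec_generar_triangulo numero out) := by unfold Spec_generar_triangulo; infer_instance

-- ===== CLAIM (what is proved, stated in full; the proofs are below) =====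
def Claim_equal_generar_triangulo : Prop := ∀ (numero : Int), Dom_generar_triangulo numero → Spec_generar_triangulo numero (generar_triangulo numero)

-- ===== LEMMAS AND PROOFS =====

-- the row of width j (j copies of "* ")
def pvRow (j : Nat) : List Char := (List.replicate j "* ".toList).flatten

-- A's loop invariant: from state (triangulo, mensaje) it appends the rows
-- triangulo ++ pvRow 1, triangulo ++ pvRow 2, … each followed by '\n'
theorem pvAGo_spec (fuel : Nat) (t m : List Char) :
    pvAGo fuel t m =
      m ++ (List.flatten ((List.range fuel).map (fun k => t ++ pvRow (k + 1) ++ "\n".toList))) := by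
  induction fuel generalizing t m with
  | zero => simp [pvAGo]
  | succ f ih =>
      rw [pvAGo, ih, List.range_succ_eq_map]
      simp [pvRow, List.replicate_succ, List.append_assoc]
      refine congrArg List.flatten (List.map_congr_left (fun k _ => ?_))
      simp [Function.comp, List.replicate_succ]

-- a prefix of the widest row is the corresponding shorter row
theorem pvTakeRow (i n : Nat) (h : i ≤ n) : (pvRow n).take (2 * i) = pvRow i := by
  induction i generalizing n with
  | zero => simp [pvRow]
  | succ j ih =>
      obtain ⟨m, rfl⟩ : ∃ m, n = m + 1 := ⟨n - 1, by omega⟩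
      have : 2 * (j + 1) = 2 * j + 1 + 1 := by ring
      rw [this]
      show (pvRow (m + 1)).take (2 * j + 1 + 1) = pvRow (j + 1)
      simp only [pvRow, List.replicate_succ, List.flatten_cons]
      show ('*' :: ' ' :: (List.replicate m "* ".toList).flatten).take (2 * j + 1 + 1)
            = '*' :: ' ' :: (List.replicate j "* ".toList).flatten
      rw [List.take_succ_cons, List.take_succ_cons]
      have := ih m (by omega)
      simpa [pvRow] using this

-- B's loop: reversed, it is exactly the rows 1 .. k (as prefixes of fila)
theorem pvBLoop_rev (fila : List Char) (k : Nat) (partes : List (List Char)) :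
    (pvBLoop fila k partes).reverse =
      ((List.range k).map
        (fun (j : Nat) => PySem.List.slice fila none (some (2 * ((j : Int) + 1))) ++ "\n".toList))
        ++ partes.reverse := by
  induction k generalizing partes with
  | zero => simp [pvBLoop]
  | succ m ih =>
      rw [pvBLoop, ih, List.range_succ]
      simp

theorem generar_triangulo_spec : Claim_equal_generar_triangulo := by
  intro numero _
  show generar_triangulo numero = generar_triangulo_alt numero
  unfold generar_triangulo generar_triangulo_alt
  rw [pvAGo_spec]
  congr 1
  rw [pvBLoop_rev]
  simp only [List.append_nil, List.reverse_nil, List.nil_append]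
  refine congrArg List.flatten (List.map_congr_left (fun j hj => ?_))
  have hj' : j < numero.toNat := List.mem_range.mp hj
  have hcast : (2 * ((j : Int) + 1)) = ((2 * (j + 1) : Nat) : Int) := by push_cast; ring
  rw [hcast, PySem.List.slice_to_natCast]
  have hfila : PySem.List.pyRepeat "* ".toList numero = pvRow numero.toNat := by
    simp [PySem.List.pyRepeat, pvRow]
  rw [hfila, pvTakeRow (j + 1) numero.toNat (by omega)]
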